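-- pv_equiv track=rewrite | github.com/BaicaiCoin/Key_frame_extract | demo4/key_frame_extract.py | merge_areas
-- ===== SOURCE A (Python) =====
-- def merge_areas(contours, merged_threshold):
--     """
--     Aggregates a set of rectangles that are close together and returns a list of the smallest rectangles of the settlement.
--
--     Params:
--         contours (list): a list of rectangles, each of which is a 2x2 matrix.
--         merged_threshold (int): The threshold for determining whether rectangles are close.
--     """
--     def calculate_distance(rect1, rect2):
--         """
--         Calculates the nearest boundary distance between two rectangles.
--         """
--         x1_A, y1_A, x2_A, y2_A = rect1[0][0], rect1[0][1], rect1[1][0], rect1[1][1]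
--         x1_B, y1_B, x2_B, y2_B = rect2[0][0], rect2[0][1], rect2[1][0], rect2[1][1]
--         dx = max(0, max(x1_B - x2_A, x1_A - x2_B))
--         dy = max(0, max(y1_B - y2_A, y1_A - y2_B))
--         return dx + dy
--
--     n = len(contours)
--     parent = list(range(n))
--     rank = [0] * n
--
--     def find(x):
--         """Finds the root node of the set"""
--         if parent[x] != x:
--             parent[x] = find(parent[x])
--         return parent[x]
--
--     def union(x, y):
--         """Merge two sets"""
--         root_x = find(x)
--         root_y = find(y)
--         if root_x != root_y:
--             if rank[root_x] > rank[root_y]: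
--                 parent[root_y] = root_x
--             elif rank[root_x] < rank[root_y]:
--                 parent[root_x] = root_y
--             else:
--                 parent[root_y] = root_x
--                 rank[root_x] += 1
--
--     for i in range(n):
--         for j in range(i + 1, n):
--             if calculate_distance(contours[i], contours[j]) <= merged_threshold:
--                 union(i, j)
--
--     groups = {}
--     for i in range(n):
--         root = find(i)
--         if root not in groups:
--             groups[root] = []
--         groups[root].append(contours[i])
--
--     merged_rectangles = []
--     for group in groups.values():
--         min_x = min(rect[0][0] for rect in group)
--         min_y = min(rect[0][1] for rect in group)
--         max_x = max(rect[1][0] for rect in group)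
--         max_y = max(rect[1][1] for rect in group)
--         merged_rectangles.append([[min_x, min_y], [max_x, max_y]])
--
--     return merged_rectangles
-- ===== SOURCE B (Python) =====
-- def merge_areas(contours, merged_threshold):
--     """
--     Aggregates a set of rectangles that are close together and returns a list of the
--     smallest rectangles of the settlement.  Alternative implementation: instead of a
--     union-find forest (parent/rank arrays, recursive find with path compression) plus
--     a root-keyed dict, it keeps a flat component-label array comp, where comp[x] is
--     the smallest rectangle index of x's component; joining two components relabels
--     both to the smaller label in one pass, and the output is emitted directly by
--     scanning the labels (no dict needed).
--     """
--     def calculate_distance(rect1, rect2):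
--         x1_A, y1_A, x2_A, y2_A = rect1[0][0], rect1[0][1], rect1[1][0], rect1[1][1]
--         x1_B, y1_B, x2_B, y2_B = rect2[0][0], rect2[0][1], rect2[1][0], rect2[1][1]
--         dx = max(0, max(x1_B - x2_A, x1_A - x2_B))
--         dy = max(0, max(y1_B - y2_A, y1_A - y2_B))
--         return dx + dy
--
--     n = len(contours)
--     comp = list(range(n))
--
--     for i in range(n):
--         for j in range(i + 1, n):
--             if calculate_distance(contours[i], contours[j]) <= merged_threshold:
--                 a, b = comp[i], comp[j]
--                 if a != b:
--                     m = min(a, b)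
--                     comp = [m if c == a or c == b else c for c in comp]
--
--     merged_rectangles = []
--     for i in range(n):
--         if comp[i] == i:  # i is the smallest index of its component
--             group = [contours[k] for k in range(n) if comp[k] == i]
--             min_x = min(rect[0][0] for rect in group)
--             min_y = min(rect[0][1] for rect in group)
--             max_x = max(rect[1][0] for rect in group)
--             max_y = max(rect[1][1] for rect in group)
--             merged_rectangles.append([[min_x, min_y], [max_x, max_y]])
--     return merged_rectangles
-- ===== Notes on version B (the rewrite author's own statement) =====
-- stated objective: alternative
-- what changed: Replaced the union-find forest (parent/rank arrays, recursive find with path compression) and the root-keyed dict grouping by a flat component-label array comp whose entry is the smallest member index of each component: a merge relabels both components to the smaller label in one pass, and the output is emitted by a direct scan over the labels with no dict at all.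
import Mathlib
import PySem

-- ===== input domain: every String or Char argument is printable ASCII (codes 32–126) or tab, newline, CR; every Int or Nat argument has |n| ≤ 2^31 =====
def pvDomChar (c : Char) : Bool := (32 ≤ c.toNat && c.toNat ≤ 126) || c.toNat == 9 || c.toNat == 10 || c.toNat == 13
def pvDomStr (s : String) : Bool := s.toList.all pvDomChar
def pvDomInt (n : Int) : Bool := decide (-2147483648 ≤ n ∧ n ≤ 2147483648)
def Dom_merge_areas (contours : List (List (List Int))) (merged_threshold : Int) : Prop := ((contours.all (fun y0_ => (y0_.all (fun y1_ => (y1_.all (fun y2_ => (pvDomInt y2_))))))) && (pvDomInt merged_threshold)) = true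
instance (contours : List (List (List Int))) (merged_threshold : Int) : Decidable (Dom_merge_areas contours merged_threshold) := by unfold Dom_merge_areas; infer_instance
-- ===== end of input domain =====

-- B replaces A's union-find forest (parent/rank, recursive find with path compression) and root-keyed
-- dict by a flat minimum-label array relabelled on each merge, emitting boxes by a direct label scan
-- (alternative decomposition, similar cost).


-- ===== PORT A =====
-- shared helpers (this code is textually identical in both Pythons):
-- rect[i][j] for the literal indices 0/1; exact on Pre_ (every rect is at least 2×2;
-- Python raises IndexError otherwise, which Pre_ excludes)
def pvAt (r : List (List Int)) (i j : Nat) : Int := (r.getD i []).getD j 0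

-- calculate_distance(rect1, rect2)
def pvCalcDist (r1 r2 : List (List Int)) : Int :=
  let dx := max 0 (max (pvAt r2 0 0 - pvAt r1 1 0) (pvAt r1 0 0 - pvAt r2 1 0))
  let dy := max 0 (max (pvAt r2 0 1 - pvAt r1 1 1) (pvAt r1 0 1 - pvAt r2 1 1))
  dx + dy

-- min_x/min_y/max_x/max_y over one group and the [[min_x,min_y],[max_x,max_y]] box;
-- groups are always nonempty, so the .getD 0 default is never used (Python min/max
-- would raise on an empty group, which never occurs)
def pvBBox (group : List (List (List Int))) : List (List Int) :=
  let min_x := (PySem.List.min? (group.map (fun r => pvAt r 0 0)) (fun x => x)).getD 0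
  let min_y := (PySem.List.min? (group.map (fun r => pvAt r 0 1)) (fun x => x)).getD 0
  let max_x := (PySem.List.max? (group.map (fun r => pvAt r 1 0)) (fun x => x)).getD 0
  let max_y := (PySem.List.max? (group.map (fun r => pvAt r 1 1)) (fun x => x)).getD 0
  [[min_x, min_y], [max_x, max_y]]

-- find(x) with path compression; Python's recursion has no fuel — the first argument is a
-- totality guard only, always called with fuel = len(parent), which is enough: under the
-- union-by-rank invariant every parent chain reaches its root in < len(parent) steps
def pvFind : Nat → List Nat → Nat → (List Nat × Nat)
  | 0, p, x => (p, x)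
  | fuel+1, p, x =>
    let px := p.getD x x
    if px = x then (p, x)
    else
      let res := pvFind fuel p px
      (res.1.set x res.2, res.2)

-- union(x, y) with union by rank
def pvUnion (p rk : List Nat) (x y : Nat) : List Nat × List Nat :=
  let f1 := pvFind p.length p x
  let f2 := pvFind f1.1.length f1.1 y
  let p2 := f2.1
  let rx := f1.2
  let ry := f2.2
  if rx ≠ ry then
    if rk.getD ry 0 < rk.getD rx 0 then (p2.set ry rx, rk)
    else if rk.getD rx 0 < rk.getD ry 0 then (p2.set rx ry, rk)
    else (p2.set ry rx, rk.set rx (rk.getD rx 0 + 1))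
  else (p2, rk)

-- body of the i/j double loop: 'if calculate_distance(...) <= merged_threshold: union(i, j)'
def pvPairStepA (contours : List (List (List Int))) (thr : Int) (i : Nat)
    (st : List Nat × List Nat) (j : Nat) : List Nat × List Nat :=
  if pvCalcDist (contours.getD i []) (contours.getD j []) ≤ thr then pvUnion st.1 st.2 i j
  else st

-- body of the grouping loop: root = find(i); groups.setdefault(root, []); groups[root].append(contours[i])
def pvGroupStepA (contours : List (List (List Int)))
    (st : List Nat × PySem.Dict Nat (List (List (List Int)))) (i : Nat) :
    List Nat × PySem.Dict Nat (List (List (List Int))) :=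
  let f := pvFind st.1.length st.1 i
  let g := if st.2.contains f.2 then st.2 else st.2.insert f.2 []
  (f.1, g.insert f.2 (g.getD f.2 [] ++ [contours.getD i []]))

def merge_areas (contours : List (List (List Int))) (merged_threshold : Int) : List (List (List Int)) :=
  let n := contours.length
  -- parent = list(range(n)); rank = [0]*n; the i<j double loop of unions
  let st := (List.range n).foldl
    (fun st i => (List.range' (i+1) (n - (i+1))).foldl (pvPairStepA contours merged_threshold i) st)
    (List.range n, List.replicate n 0)
  -- groups = {}; for i in range(n): ...
  let gr := (List.range n).foldl (pvGroupStepA contours) (st.1, PySem.Dict.empty)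
  -- for group in groups.values(): merged_rectangles.append(bbox)
  gr.2.values.foldl (fun acc g => acc ++ [pvBBox g]) []

-- ===== PORT B =====
-- body of B's i/j double loop: relabel both components to the smaller label
def pvPairStepB (contours : List (List (List Int))) (thr : Int) (i : Nat)
    (comp : List Nat) (j : Nat) : List Nat :=
  if pvCalcDist (contours.getD i []) (contours.getD j []) ≤ thr then
    let a := comp.getD i 0
    let b := comp.getD j 0
    if a ≠ b then
      let m := min a b
      comp.map (fun c => if c = a ∨ c = b then m else c)
    else comp
  else comp

def merge_areas_alt (contours : List (List (List Int))) (merged_threshold : Int) : List (List (List Int)) :=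
  let n := contours.length
  -- comp = list(range(n)); the i<j double loop of relabellings
  let comp := (List.range n).foldl
    (fun comp i => (List.range' (i+1) (n - (i+1))).foldl (pvPairStepB contours merged_threshold i) comp)
    (List.range n)
  -- for i in range(n): if comp[i] == i: emit the bbox of [contours[k] for k in range(n) if comp[k] == i]
  (List.range n).foldl
    (fun acc i =>
      if comp.getD i 0 == i then
        acc ++ [pvBBox (((List.range n).filter (fun k => comp.getD k 0 == i)).map (fun k => contours.getD k []))]
      else acc)
    []

-- ===== PRECONDITION & SPEC =====
-- Pre_ excludes exactly the inputs on which Python A raises IndexError: any rectangle that is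
-- not at least a 2x2 matrix (A indexes rect[0][0], rect[0][1], rect[1][0], rect[1][1]).
def Pre_merge_areas (contours : List (List (List Int))) (merged_threshold : Int) : Prop :=
  ∀ r ∈ contours, 2 ≤ r.length ∧ 2 ≤ (r.getD 0 []).length ∧ 2 ≤ (r.getD 1 []).length

instance (contours : List (List (List Int))) (merged_threshold : Int) : Decidable (Pre_merge_areas contours merged_threshold) := by unfold Pre_merge_areas; infer_instance

def pvWitness_merge_areas : List (List (List Int)) × Int := ([[[0, 0], [2, 2]], [[3, 3], [5, 4]], [[30, 30], [31, 31]]], 2)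

def Spec_merge_areas (contours : List (List (List Int))) (merged_threshold : Int) (out : List (List (List Int))) : Prop := out = merge_areas_alt contours merged_threshold
instance (contours : List (List (List Int))) (merged_threshold : Int) (out : List (List (List Int))) : Decidable (Spec_merge_areas contours merged_threshold out) := by unfold Spec_merge_areas; infer_instance

-- ===== CLAIM (what is proved, stated in full; the proofs are below) =====
def Claim_equal_merge_areas : Prop := ∀ (contours : List (List (List Int))) (merged_threshold : Int), Dom_merge_areas contours merged_threshold → Pre_merge_areas contours merged_threshold → Spec_merge_areas contours merged_threshold (merge_areas contours merged_threshold)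

-- ===== LEMMAS AND PROOFS =====

-- one step up a parent chain (out-of-range reads return the index itself, which never
-- happens for indices < n; it makes indices ≥ n fixed points, matching pvFind's getD default)
def pvStep (p : List Nat) (x : Nat) : Nat := p.getD x x

-- the root of x's parent chain (p.length iterations always suffice under the invariant)
def pvRoot (p : List Nat) (x : Nat) : Nat := (pvStep p)^[p.length] x

-- the union-by-rank forest invariant: sizes, closure, and rank strictly increasing towards the parent
def UFInv (n : Nat) (p rk : List Nat) : Prop :=
  p.length = n ∧ rk.length = n ∧
  ∀ x, x < n → pvStep p x < n ∧ (pvStep p x ≠ x → rk.getD x 0 < rk.getD (pvStep p x) 0)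

-- B's invariant: comp.getD u 0 is the least index in u's component (w.r.t. A's current forest)
def MinRep (n : Nat) (p comp : List Nat) : Prop :=
  comp.length = n ∧
  ∀ u, u < n → comp.getD u 0 < n ∧ pvRoot p (comp.getD u 0) = pvRoot p u ∧
    ∀ v, v < n → pvRoot p v = pvRoot p u → comp.getD u 0 ≤ v

theorem uf_step_ge {p : List Nat} {x : Nat} (h : p.length ≤ x) : pvStep p x = x := by
  simp [pvStep, List.getD_eq_getElem?_getD, List.getElem?_eq_none (by omega : p.length ≤ x)]

theorem uf_step_lt {n : Nat} {p rk : List Nat} (hI : UFInv n p rk) {x : Nat} (hx : x < n) :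
    pvStep p x < n := (hI.2.2 x hx).1

theorem uf_iter_lt {n : Nat} {p rk : List Nat} (hI : UFInv n p rk) {x : Nat} (hx : x < n)
    (k : Nat) : (pvStep p)^[k] x < n := by
  induction k generalizing x with
  | zero => simpa
  | succ k ih =>
    rw [Function.iterate_succ_apply]
    exact ih (uf_step_lt hI hx)

theorem uf_root_of_isRoot {p : List Nat} {r : Nat} (h : pvStep p r = r) : pvRoot p r = r :=
  Function.iterate_fixed h _

-- fixpoints persist along iteration
theorem uf_iter_fix {p : List Nat} {x : Nat} {k : Nat}
    (h : pvStep p ((pvStep p)^[k] x) = (pvStep p)^[k] x) {m : Nat} (hm : k ≤ m) :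
    (pvStep p)^[m] x = (pvStep p)^[k] x := by
  obtain ⟨d, rfl⟩ := Nat.exists_eq_add_of_le hm
  rw [Nat.add_comm, Function.iterate_add_apply]
  exact Function.iterate_fixed h d

-- getD after set, at and off the written index
theorem pv_getD_set_self {p : List Nat} {x v d : Nat} (h : x < p.length) :
    (p.set x v).getD x d = v := by
  simp [List.getD_eq_getElem?_getD]
  rw [List.getElem?_set_eq_of_lt v h]
  rfl

theorem pv_getD_set_ne {p : List Nat} {x v z d : Nat} (h : z ≠ x) :
    (p.set x v).getD z d = p.getD z d := by
  simp [List.getD_eq_getElem?_getD]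
  rw [List.getElem?_set]
  simp only [if_neg (fun hh : x = z => h hh.symm)]

theorem pv_step_set_self {p : List Nat} {x v : Nat} (h : x < p.length) :
    pvStep (p.set x v) x = v := by
  rw [pvStep, pv_getD_set_self h]

theorem pv_step_set_ne {p : List Nat} {x v z : Nat} (h : z ≠ x) :
    pvStep (p.set x v) z = pvStep p z := by
  rw [pvStep, pv_getD_set_ne h]
  rfl

-- ranks strictly increase along a chain that has not yet reached its root
theorem uf_rank_chain {n : Nat} {p rk : List Nat} (hI : UFInv n p rk) {x : Nat} (hx : x < n)
    {N : Nat} (hnf : ∀ k ≤ N, pvStep p ((pvStep p)^[k] x) ≠ (pvStep p)^[k] x) :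
    ∀ k ≤ N + 1, ∀ j < k, rk.getD ((pvStep p)^[j] x) 0 < rk.getD ((pvStep p)^[k] x) 0 := by
  intro k hk
  induction k with
  | zero => omega
  | succ k ih =>
    intro j hj
    have hkN : k ≤ N := by omega
    have hlt : (pvStep p)^[k] x < n := uf_iter_lt hI hx k
    have hstep : rk.getD ((pvStep p)^[k] x) 0 < rk.getD ((pvStep p)^[k+1] x) 0 := by
      rw [Function.iterate_succ_apply']
      exact (hI.2.2 _ hlt).2 (hnf k hkN)
    rcases Nat.lt_succ_iff_lt_or_eq.mp hj with hj' | rfl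
    · exact lt_trans (ih (by omega) j hj') hstep
    · exact hstep

-- under the invariant, n-1 steps reach the root (pigeonhole on the n vertices)
theorem uf_fix_pred {n : Nat} {p rk : List Nat} (hI : UFInv n p rk) {x : Nat} (hx : x < n) :
    pvStep p ((pvStep p)^[n-1] x) = (pvStep p)^[n-1] x := by
  by_contra hcon
  have hnf : ∀ k ≤ n - 1, pvStep p ((pvStep p)^[k] x) ≠ (pvStep p)^[k] x := by
    intro k hk hfix
    have heq := uf_iter_fix hfix hk
    rw [heq] at hcon
    exact hcon hfix
  have hchain := uf_rank_chain hI hx hnf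
  have hmaps : ∀ t ∈ Finset.range (n + 1), (pvStep p)^[t] x ∈ Finset.range n := by
    intro t _
    exact Finset.mem_range.mpr (uf_iter_lt hI hx t)
  obtain ⟨t1, ht1, t2, ht2, hne, heq⟩ :=
    Finset.exists_ne_map_eq_of_card_lt_of_maps_to
      (by simp : (Finset.range n).card < (Finset.range (n+1)).card) hmaps
  simp only [Finset.mem_range] at ht1 ht2
  rcases Nat.lt_or_ge t1 t2 with h12 | h21
  · have hlt := hchain t2 (by omega) t1 h12
    rw [heq] at hlt
    exact lt_irrefl _ hlt
  · have hlt := hchain t1 (by omega) t2 (by omega)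
    rw [heq] at hlt
    exact lt_irrefl _ hlt

theorem uf_root_eq_pred {n : Nat} {p rk : List Nat} (hI : UFInv n p rk) {x : Nat} (hx : x < n) :
    pvRoot p x = (pvStep p)^[n-1] x := by
  have hlen : p.length = n := hI.1
  have := uf_iter_fix (uf_fix_pred hI hx) (m := n) (by omega)
  rw [pvRoot, hlen, this]

theorem uf_isRoot_root {n : Nat} {p rk : List Nat} (hI : UFInv n p rk) {x : Nat} (hx : x < n) :
    pvStep p (pvRoot p x) = pvRoot p x := by
  rw [uf_root_eq_pred hI hx]; exact uf_fix_pred hI hx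

theorem uf_root_lt {n : Nat} {p rk : List Nat} (hI : UFInv n p rk) {x : Nat} (hx : x < n) :
    pvRoot p x < n := by
  rw [pvRoot, hI.1]; exact uf_iter_lt hI hx n

theorem uf_root_step {n : Nat} {p rk : List Nat} (hI : UFInv n p rk) {x : Nat} (hx : x < n) :
    pvRoot p (pvStep p x) = pvRoot p x := by
  have hlen : p.length = n := hI.1
  have h1 : pvRoot p (pvStep p x) = (pvStep p)^[p.length + 1] x := by
    rw [pvRoot, ← Function.iterate_succ_apply]
  have hfix := uf_fix_pred hI hx
  have e1 := uf_iter_fix hfix (m := p.length + 1) (by omega)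
  have e2 := uf_iter_fix hfix (m := p.length) (by omega)
  rw [h1, e1, pvRoot, e2]

theorem uf_root_ge {n : Nat} {p : List Nat} (hlen : p.length = n) {z : Nat} (hz : n ≤ z) :
    pvRoot p z = z :=
  uf_root_of_isRoot (uf_step_ge (by omega))

theorem uf_rank_lt_root {n : Nat} {p rk : List Nat} (hI : UFInv n p rk) {x : Nat} (hx : x < n)
    (hnr : pvStep p x ≠ x) : rk.getD x 0 < rk.getD (pvRoot p x) 0 := by
  have haux : ∀ k, ∀ x, x < n → pvStep p ((pvStep p)^[k] x) = (pvStep p)^[k] x →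
      pvStep p x ≠ x → rk.getD x 0 < rk.getD (pvRoot p x) 0 := by
    intro k
    induction k with
    | zero => intro x hx hfix hne; exact absurd hfix hne
    | succ k ih =>
      intro x hx hfix hne
      have h1 : rk.getD x 0 < rk.getD (pvStep p x) 0 := (hI.2.2 x hx).2 hne
      have hsx : pvStep p x < n := uf_step_lt hI hx
      by_cases h2 : pvStep p (pvStep p x) = pvStep p x
      · have : pvRoot p x = pvStep p x := by
          rw [← uf_root_step hI hx, uf_root_of_isRoot h2]
        rw [this]; exact h1
      · have hfix' : pvStep p ((pvStep p)^[k] (pvStep p x)) = (pvStep p)^[k] (pvStep p x) := by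
          rw [← Function.iterate_succ_apply]; exact hfix
        have := ih (pvStep p x) hsx hfix' h2
        rw [uf_root_step hI hx] at this
        omega
  exact haux (n-1) x hx (uf_fix_pred hI hx) hnr

-- re-pointing x directly at its own root preserves the invariant and every root
theorem uf_compress {n : Nat} {p rk : List Nat} (hI : UFInv n p rk) {x r : Nat} (hx : x < n)
    (hr : r = pvRoot p x) (hxr : x ≠ r) (hrk : rk.getD x 0 < rk.getD r 0) :
    UFInv n (p.set x r) rk ∧ ∀ z, pvRoot (p.set x r) z = pvRoot p z := by
  have hlen : p.length = n := hI.1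
  have hrlt : r < n := hr ▸ uf_root_lt hI hx
  have hrroot : pvStep p r = r := hr ▸ uf_isRoot_root hI hx
  have hI2 : UFInv n (p.set x r) rk := by
    refine ⟨by simpa using hlen, hI.2.1, ?_⟩
    intro z hz
    by_cases hzx : z = x
    · rw [hzx, pv_step_set_self (by omega)]
      exact ⟨hrlt, fun _ => hrk⟩
    · rw [pv_step_set_ne hzx]
      exact hI.2.2 z hz
  refine ⟨hI2, ?_⟩
  have hroot_case : ∀ z, z < n → pvStep p z = z → pvRoot (p.set x r) z = pvRoot p z := by
    intro z hz hfz
    have hzx : z ≠ x := by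
      intro h
      rw [h] at hfz
      exact hxr (hr.trans (uf_root_of_isRoot hfz)).symm
    rw [uf_root_of_isRoot (by rw [pv_step_set_ne hzx]; exact hfz),
      uf_root_of_isRoot hfz]
  have haux : ∀ k, ∀ z, z < n → pvStep p ((pvStep p)^[k] z) = (pvStep p)^[k] z →
      pvRoot (p.set x r) z = pvRoot p z := by
    intro k
    induction k with
    | zero =>
      intro z hz hfix
      simp only [Function.iterate_zero, id_eq] at hfix
      exact hroot_case z hz hfix
    | succ k ih =>
      intro z hz hfix
      by_cases hfz : pvStep p z = z
      · exact hroot_case z hz hfz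
      · by_cases hzx : z = x
        · have h1 : pvRoot (p.set x r) z = pvRoot (p.set x r) r := by
            rw [← uf_root_step hI2 hz, hzx, pv_step_set_self (by omega)]
          have h2 : pvStep (p.set x r) r = r := by
            rw [pv_step_set_ne (Ne.symm hxr)]; exact hrroot
          rw [h1, uf_root_of_isRoot h2, hzx, ← hr]
        · have hsz : pvStep p z < n := uf_step_lt hI hz
          have hfix' : pvStep p ((pvStep p)^[k] (pvStep p z)) = (pvStep p)^[k] (pvStep p z) := by
            rw [← Function.iterate_succ_apply]; exact hfix
          calc pvRoot (p.set x r) z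
              = pvRoot (p.set x r) (pvStep (p.set x r) z) := (uf_root_step hI2 hz).symm
            _ = pvRoot (p.set x r) (pvStep p z) := by rw [pv_step_set_ne hzx]
            _ = pvRoot p (pvStep p z) := ih (pvStep p z) hsz hfix'
            _ = pvRoot p z := uf_root_step hI hz
  intro z
  by_cases hzn : z < n
  · exact haux (n-1) z hzn (uf_fix_pred hI hzn)
  · rw [uf_root_ge hI2.1 (by omega), uf_root_ge hlen (by omega)]

-- linking root b under root a merges exactly the two classes
theorem uf_link {n : Nat} {p rk rk2 : List Nat} (hI : UFInv n p rk) {a b : Nat}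
    (ha : a < n) (hb : b < n) (hra : pvStep p a = a) (hrb : pvStep p b = b) (hab : a ≠ b)
    (hlen2 : rk2.length = rk.length)
    (hoth : ∀ z, z ≠ a → rk2.getD z 0 = rk.getD z 0)
    (hmono : rk.getD a 0 ≤ rk2.getD a 0)
    (hba : rk.getD b 0 < rk2.getD a 0) :
    UFInv n (p.set b a) rk2 ∧
      ∀ z, pvRoot (p.set b a) z = if pvRoot p z = b then a else pvRoot p z := by
  have hlen : p.length = n := hI.1
  have hI2 : UFInv n (p.set b a) rk2 := by
    refine ⟨by simpa using hlen, by rw [hlen2]; exact hI.2.1, ?_⟩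
    intro z hz
    by_cases hzb : z = b
    · rw [hzb, pv_step_set_self (by omega)]
      refine ⟨ha, fun _ => ?_⟩
      rw [hoth b (by omega)]
      exact hba
    · rw [pv_step_set_ne hzb]
      refine ⟨(hI.2.2 z hz).1, fun hne => ?_⟩
      have h1 : rk.getD z 0 < rk.getD (pvStep p z) 0 := (hI.2.2 z hz).2 hne
      have hza : z ≠ a := by
        intro h; rw [h] at hne; exact hne hra
      rw [hoth z hza]
      by_cases hsa : pvStep p z = a
      · rw [hsa] at h1 ⊢; omega
      · rw [hoth _ hsa]; exact h1
  refine ⟨hI2, ?_⟩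
  have hroot_case : ∀ z, z < n → pvStep p z = z →
      pvRoot (p.set b a) z = if pvRoot p z = b then a else pvRoot p z := by
    intro z hz hfz
    by_cases hzb : z = b
    · have h2 : pvStep (p.set b a) a = a := by
        rw [pv_step_set_ne hab]; exact hra
      have h1 : pvRoot (p.set b a) z = pvRoot (p.set b a) a := by
        rw [← uf_root_step hI2 hz, hzb, pv_step_set_self (by omega)]
      rw [h1, uf_root_of_isRoot h2, uf_root_of_isRoot hfz, if_pos hzb]
    · rw [uf_root_of_isRoot (by rw [pv_step_set_ne hzb]; exact hfz),
        uf_root_of_isRoot hfz, if_neg hzb]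
  have haux : ∀ k, ∀ z, z < n → pvStep p ((pvStep p)^[k] z) = (pvStep p)^[k] z →
      pvRoot (p.set b a) z = if pvRoot p z = b then a else pvRoot p z := by
    intro k
    induction k with
    | zero =>
      intro z hz hfix
      simp only [Function.iterate_zero, id_eq] at hfix
      exact hroot_case z hz hfix
    | succ k ih =>
      intro z hz hfix
      by_cases hfz : pvStep p z = z
      · exact hroot_case z hz hfz
      · have hzb : z ≠ b := by
          intro h; rw [h] at hfz; exact hfz hrb
        have hsz : pvStep p z < n := uf_step_lt hI hz
        have hfix' : pvStep p ((pvStep p)^[k] (pvStep p z)) = (pvStep p)^[k] (pvStep p z) := by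
          rw [← Function.iterate_succ_apply]; exact hfix
        calc pvRoot (p.set b a) z
            = pvRoot (p.set b a) (pvStep (p.set b a) z) := (uf_root_step hI2 hz).symm
          _ = pvRoot (p.set b a) (pvStep p z) := by rw [pv_step_set_ne hzb]
          _ = if pvRoot p (pvStep p z) = b then a else pvRoot p (pvStep p z) :=
              ih (pvStep p z) hsz hfix'
          _ = if pvRoot p z = b then a else pvRoot p z := by rw [uf_root_step hI hz]
  intro z
  by_cases hzn : z < n
  · exact haux (n-1) z hzn (uf_fix_pred hI hzn)
  · rw [uf_root_ge hI2.1 (by omega), uf_root_ge hlen (by omega),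
      if_neg (by omega)]

theorem uf_find_spec {n : Nat} {p rk : List Nat} (fuel : Nat) (hI : UFInv n p rk) {x : Nat}
    (hx : x < n) (hFB : pvStep p ((pvStep p)^[fuel] x) = (pvStep p)^[fuel] x) :
    (pvFind (fuel+1) p x).2 = pvRoot p x ∧ UFInv n (pvFind (fuel+1) p x).1 rk ∧
      ∀ z, pvRoot (pvFind (fuel+1) p x).1 z = pvRoot p z := by
  induction fuel generalizing x with
  | zero =>
    simp only [Function.iterate_zero, id_eq] at hFB
    have hpx : p.getD x x = x := hFB
    rw [pvFind]
    simp only [if_pos hpx]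
    exact ⟨(uf_root_of_isRoot hFB).symm, hI, fun _ => trivial⟩
  | succ fuel ih =>
    by_cases hpx : p.getD x x = x
    · rw [pvFind]
      simp only [if_pos hpx]
      exact ⟨(uf_root_of_isRoot hpx).symm, hI, fun _ => trivial⟩
    · have hne : pvStep p x ≠ x := hpx
      have hsx : p.getD x x < n := uf_step_lt hI hx
      have hFB' : pvStep p ((pvStep p)^[fuel] (p.getD x x)) = (pvStep p)^[fuel] (p.getD x x) := by
        rw [show (p.getD x x) = pvStep p x from rfl, ← Function.iterate_succ_apply]
        exact hFB
      obtain ⟨hr, hI1, hroots⟩ := ih hsx hFB'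
      rw [pvFind]
      simp only [if_neg hpx]
      set res := pvFind (fuel + 1) p (p.getD x x) with hres
      have hr' : res.2 = pvRoot p x := by
        rw [hr, show (p.getD x x) = pvStep p x from rfl, uf_root_step hI hx]
      have hrr1 : res.2 = pvRoot res.1 x := by rw [hr', ← hroots x]
      have hrkx : rk.getD x 0 < rk.getD res.2 0 := by
        rw [hr']; exact uf_rank_lt_root hI hx hne
      have hxr : x ≠ res.2 := by
        intro h; rw [← h] at hrkx; omega
      obtain ⟨hI2, hroots2⟩ := uf_compress hI1 hx hrr1 hxr hrkx
      refine ⟨hr', hI2, fun z => ?_⟩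
      rw [hroots2 z, hroots z]

-- the pure shape of "link as an update of the root map", as an iff
theorem link_iff {a b ru rv : Nat} (hab : a ≠ b) :
    ((if ru = b then a else ru) = (if rv = b then a else rv)) ↔
      (ru = rv ∨ (ru = a ∧ rv = b) ∨ (ru = b ∧ rv = a)) := by
  by_cases h1 : ru = b <;> by_cases h2 : rv = b <;>
    simp [h1, h2, Ne.symm hab, eq_comm] <;> tauto

theorem uf_union_spec {n : Nat} {p rk : List Nat} (hI : UFInv n p rk) {x y : Nat}
    (hx : x < n) (hy : y < n) :
    UFInv n (pvUnion p rk x y).1 (pvUnion p rk x y).2 ∧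
      ∀ u v, (pvRoot (pvUnion p rk x y).1 u = pvRoot (pvUnion p rk x y).1 v ↔
        (pvRoot p u = pvRoot p v ∨ (pvRoot p u = pvRoot p x ∧ pvRoot p v = pvRoot p y) ∨
          (pvRoot p u = pvRoot p y ∧ pvRoot p v = pvRoot p x))) := by
  have hlen : p.length = n := hI.1
  have hpl : p.length = (n-1)+1 := by omega
  obtain ⟨hr1, hI1, hroots1⟩ := uf_find_spec (n-1) hI hx (uf_fix_pred hI hx)
  simp only [pvUnion]
  rw [hpl]
  set p1 := (pvFind ((n-1)+1) p x).1 with hp1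
  set rx := (pvFind ((n-1)+1) p x).2 with hrxdef
  have hp1l : p1.length = (n-1)+1 := by rw [hI1.1]; omega
  rw [hp1l]
  obtain ⟨hr2, hI2, hroots2⟩ := uf_find_spec (n-1) hI1 hy (uf_fix_pred hI1 hy)
  set p2 := (pvFind ((n-1)+1) p1 y).1 with hp2
  set ry := (pvFind ((n-1)+1) p1 y).2 with hrydef
  have hrxv : rx = pvRoot p x := hr1
  have hryv : ry = pvRoot p y := by rw [hr2, hroots1 y]
  have hroots12 : ∀ z, pvRoot p2 z = pvRoot p z := fun z => (hroots2 z).trans (hroots1 z)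
  have hrxlt : rx < n := hrxv ▸ uf_root_lt hI hx
  have hrylt : ry < n := hryv ▸ uf_root_lt hI hy
  have hrkl : rk.length = n := hI.2.1
  by_cases hne : rx = ry
  · rw [if_neg (by simp [hne])]
    refine ⟨hI2, fun u v => ?_⟩
    rw [hroots12 u, hroots12 v]
    have hxyr : pvRoot p x = pvRoot p y := by rw [← hrxv, ← hryv, hne]
    constructor
    · exact fun h => Or.inl h
    · rintro (h | ⟨h1, h2⟩ | ⟨h1, h2⟩) <;> omega
  · rw [if_pos hne]
    have hab : pvRoot p x ≠ pvRoot p y := by rw [← hrxv, ← hryv]; exact hne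
    have hrootx2 : pvStep p2 rx = rx := by
      have : rx = pvRoot p2 x := by rw [hrxv, hroots12 x]
      rw [this]; exact uf_isRoot_root hI2 hx
    have hrooty2 : pvStep p2 ry = ry := by
      have : ry = pvRoot p2 y := by rw [hryv, hroots12 y]
      rw [this]; exact uf_isRoot_root hI2 hy
    by_cases hb1 : rk.getD ry 0 < rk.getD rx 0
    · rw [if_pos hb1]
      obtain ⟨hIl, hdesc⟩ := uf_link hI2 hrxlt hrylt hrootx2 hrooty2
        hne rfl (fun z _ => rfl) (le_refl _) hb1
      refine ⟨hIl, fun u v => ?_⟩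
      show pvRoot (p2.set ry rx) u = pvRoot (p2.set ry rx) v ↔ _
      rw [hdesc u, hdesc v]
      simp only [hroots12]
      rw [hrxv, hryv]
      exact link_iff hab
    · rw [if_neg hb1]
      by_cases hb2 : rk.getD rx 0 < rk.getD ry 0
      · rw [if_pos hb2]
        obtain ⟨hIl, hdesc⟩ := uf_link hI2 hrylt hrxlt hrooty2 hrootx2
          (Ne.symm hne) rfl (fun z _ => rfl) (le_refl _) hb2
        refine ⟨hIl, fun u v => ?_⟩
        show pvRoot (p2.set rx ry) u = pvRoot (p2.set rx ry) v ↔ _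
        rw [hdesc u, hdesc v]
        simp only [hroots12]
        rw [hrxv, hryv]
        rw [link_iff (Ne.symm hab)]
        tauto
      · rw [if_neg hb2]
        have hba' : rk.getD ry 0 < (rk.set rx (rk.getD rx 0 + 1)).getD rx 0 := by
          rw [pv_getD_set_self (by omega)]
          omega
        obtain ⟨hIl, hdesc⟩ := uf_link hI2 hrxlt hrylt hrootx2 hrooty2
          hne (by simp) (fun z hz => pv_getD_set_ne hz)
          (by rw [pv_getD_set_self (by omega)]; omega) hba'
        refine ⟨hIl, fun u v => ?_⟩
        show pvRoot (p2.set ry rx) u = pvRoot (p2.set ry rx) v ↔ _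
        rw [hdesc u, hdesc v]
        simp only [hroots12]
        rw [hrxv, hryv]
        exact link_iff hab

-- getD through map
theorem pv_getD_map {l : List Nat} {f : Nat → Nat} {u : Nat} (hu : u < l.length) :
    (l.map f).getD u 0 = f (l.getD u 0) := by
  rw [List.getD_eq_getElem?_getD, List.getD_eq_getElem?_getD, List.getElem?_map,
    List.getElem?_eq_getElem hu]
  rfl

theorem pv_step_range (n : Nat) (z : Nat) : pvStep (List.range n) z = z := by
  by_cases hz : z < n
  · simp [pvStep, List.getD_eq_getElem?_getD, hz]
  · exact uf_step_ge (by simpa using by omega)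

theorem pv_root_range (n : Nat) (z : Nat) : pvRoot (List.range n) z = z :=
  uf_root_of_isRoot (pv_step_range n z)

theorem uf_init (n : Nat) : UFInv n (List.range n) (List.replicate n 0) := by
  refine ⟨by simp, by simp, fun x hx => ?_⟩
  rw [pv_step_range]
  exact ⟨hx, fun h => absurd rfl h⟩

theorem mr_init (n : Nat) : MinRep n (List.range n) (List.range n) := by
  refine ⟨by simp, fun u hu => ?_⟩
  have hgd : (List.range n).getD u 0 = u := by
    simp [List.getD_eq_getElem?_getD, hu]
  rw [hgd]
  exact ⟨hu, rfl, fun v hv hroot => by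
    rw [pv_root_range, pv_root_range] at hroot; omega⟩

-- MinRep accessors
theorem mr_lt {n : Nat} {p comp : List Nat} (hM : MinRep n p comp) {u : Nat} (hu : u < n) :
    comp.getD u 0 < n := (hM.2 u hu).1

theorem mr_root {n : Nat} {p comp : List Nat} (hM : MinRep n p comp) {u : Nat} (hu : u < n) :
    pvRoot p (comp.getD u 0) = pvRoot p u := (hM.2 u hu).2.1

theorem mr_min {n : Nat} {p comp : List Nat} (hM : MinRep n p comp) {u v : Nat} (hu : u < n)
    (hv : v < n) (h : pvRoot p v = pvRoot p u) : comp.getD u 0 ≤ v := (hM.2 u hu).2.2 v hv h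

theorem mr_le_self {n : Nat} {p comp : List Nat} (hM : MinRep n p comp) {u : Nat} (hu : u < n) :
    comp.getD u 0 ≤ u := mr_min hM hu hu rfl

theorem mr_same {n : Nat} {p comp : List Nat} (hM : MinRep n p comp) {u v : Nat} (hu : u < n)
    (hv : v < n) (h : pvRoot p u = pvRoot p v) : comp.getD u 0 = comp.getD v 0 := by
  have h1 : comp.getD u 0 ≤ comp.getD v 0 :=
    mr_min hM hu (mr_lt hM hv) (by rw [mr_root hM hv, h])
  have h2 : comp.getD v 0 ≤ comp.getD u 0 :=
    mr_min hM hv (mr_lt hM hu) (by rw [mr_root hM hu, h])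
  omega

theorem mr_iff {n : Nat} {p comp : List Nat} (hM : MinRep n p comp) {u v : Nat} (hu : u < n)
    (hv : v < n) : comp.getD u 0 = comp.getD v 0 ↔ pvRoot p u = pvRoot p v := by
  refine ⟨fun h => ?_, mr_same hM hu hv⟩
  rw [← mr_root hM hu, h, mr_root hM hv]

theorem mr_idem {n : Nat} {p comp : List Nat} (hM : MinRep n p comp) {u : Nat} (hu : u < n) :
    comp.getD (comp.getD u 0) 0 = comp.getD u 0 :=
  mr_same hM (mr_lt hM hu) hu (mr_root hM hu)

-- one simultaneous step of the two i/j loops preserves both invariants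
theorem pair_step_joint {contours : List (List (List Int))} {thr : Int} {n i j : Nat}
    {st : List Nat × List Nat} {comp : List Nat}
    (hI : UFInv n st.1 st.2) (hM : MinRep n st.1 comp) (hi : i < n) (hj : j < n) :
    UFInv n (pvPairStepA contours thr i st j).1 (pvPairStepA contours thr i st j).2 ∧
      MinRep n (pvPairStepA contours thr i st j).1 (pvPairStepB contours thr i comp j) := by
  rw [pvPairStepA, pvPairStepB]
  by_cases hd : pvCalcDist (contours.getD i []) (contours.getD j []) ≤ thr
  · rw [if_pos hd, if_pos hd]
    obtain ⟨hIu, hiff⟩ := uf_union_spec hI hi hj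
    have hcl : comp.length = n := hM.1
    set a := comp.getD i 0 with hadef
    set b := comp.getD j 0 with hbdef
    have hRa : pvRoot st.1 a = pvRoot st.1 i := mr_root hM hi
    have hRb : pvRoot st.1 b = pvRoot st.1 j := mr_root hM hj
    have halt : a < n := mr_lt hM hi
    have hblt : b < n := mr_lt hM hj
    by_cases hab : a ≠ b
    · rw [if_pos hab]
      have hRij : pvRoot st.1 i ≠ pvRoot st.1 j := by
        intro h
        exact hab (mr_same hM hi hj h)
      -- membership in the two merged classes, via labels
      have hmem : ∀ u, u < n → ((comp.getD u 0 = a ∨ comp.getD u 0 = b) ↔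
          (pvRoot st.1 u = pvRoot st.1 i ∨ pvRoot st.1 u = pvRoot st.1 j)) := by
        intro u hu
        constructor
        · rintro (h | h)
          · exact Or.inl (by rw [← mr_root hM hu, h, hRa])
          · exact Or.inr (by rw [← mr_root hM hu, h, hRb])
        · rintro (h | h)
          · exact Or.inl (mr_same hM hu hi h)
          · exact Or.inr (mr_same hM hu hj h)
      refine ⟨hIu, by simpa using hcl, fun u hu => ?_⟩
      have hulen : u < comp.length := by omega
      have hgd : (comp.map (fun c => if c = a ∨ c = b then min a b else c)).getD u 0 =
          (if comp.getD u 0 = a ∨ comp.getD u 0 = b then min a b else comp.getD u 0) :=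
        pv_getD_map hulen
      by_cases hcu : comp.getD u 0 = a ∨ comp.getD u 0 = b
      · rw [hgd, if_pos hcu]
        have hm_ab : min a b = a ∨ min a b = b := by omega
        have hmlt : min a b < n := by omega
        have hRm : pvRoot st.1 (min a b) = pvRoot st.1 i ∨
            pvRoot st.1 (min a b) = pvRoot st.1 j := by
          rcases hm_ab with h | h <;> rw [h]
          · exact Or.inl hRa
          · exact Or.inr hRb
        have hRu := (hmem u hu).mp hcu
        refine ⟨hmlt, ?_, ?_⟩
        · refine (hiff (min a b) u).mpr ?_
          rcases hRm with h1 | h1 <;> rcases hRu with h2 | h2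
          · exact Or.inl (by rw [h1, h2])
          · exact Or.inr (Or.inl ⟨h1, h2⟩)
          · exact Or.inr (Or.inr ⟨h1, h2⟩)
          · exact Or.inl (by rw [h1, h2])
        · intro v hv hroot
          have hv' := (hiff v u).mp hroot
          have hvin : pvRoot st.1 v = pvRoot st.1 i ∨ pvRoot st.1 v = pvRoot st.1 j := by
            rcases hv' with h | ⟨h1, h2⟩ | ⟨h1, h2⟩
            · rcases hRu with h2 | h2
              · exact Or.inl (by rw [h, h2])
              · exact Or.inr (by rw [h, h2])
            · exact Or.inl h1
            · exact Or.inr h1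
          have : comp.getD v 0 = a ∨ comp.getD v 0 = b := (hmem v hv).mpr hvin
          have hle := mr_le_self hM hv
          omega
      · rw [hgd, if_neg hcu]
        have hRu : ¬(pvRoot st.1 u = pvRoot st.1 i ∨ pvRoot st.1 u = pvRoot st.1 j) :=
          fun h => hcu ((hmem u hu).mpr h)
        have hRu1 : pvRoot st.1 u ≠ pvRoot st.1 i := fun h => hRu (Or.inl h)
        have hRu2 : pvRoot st.1 u ≠ pvRoot st.1 j := fun h => hRu (Or.inr h)
        refine ⟨mr_lt hM hu, ?_, ?_⟩
        · exact (hiff (comp.getD u 0) u).mpr (Or.inl (mr_root hM hu))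
        · intro v hv hroot
          rcases (hiff v u).mp hroot with h | ⟨h1, h2⟩ | ⟨h1, h2⟩
          · exact mr_min hM hu hv h
          · exact absurd h2 hRu2
          · exact absurd h2 hRu1
    · rw [if_neg hab]
      have hab' : a = b := of_not_not hab
      have hRij : pvRoot st.1 i = pvRoot st.1 j := (mr_iff hM hi hj).mp hab' 
      refine ⟨hIu, hcl, fun u hu => ?_⟩
      refine ⟨mr_lt hM hu, ?_, ?_⟩
      · exact (hiff (comp.getD u 0) u).mpr (Or.inl (mr_root hM hu))
      · intro v hv hroot
        rcases (hiff v u).mp hroot with h | ⟨h1, h2⟩ | ⟨h1, h2⟩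
        · exact mr_min hM hu hv h
        · exact mr_min hM hu hv (by omega)
        · exact mr_min hM hu hv (by omega)
  · rw [if_neg hd, if_neg hd]
    exact ⟨hI, hM⟩

-- the inner j loop
theorem pair_fold_inner {contours : List (List (List Int))} {thr : Int} {n i : Nat}
    (js : List Nat) (hjs : ∀ j ∈ js, j < n) (hi : i < n) :
    ∀ {st : List Nat × List Nat} {comp : List Nat}, UFInv n st.1 st.2 → MinRep n st.1 comp →
    UFInv n (js.foldl (pvPairStepA contours thr i) st).1
        (js.foldl (pvPairStepA contours thr i) st).2 ∧
      MinRep n (js.foldl (pvPairStepA contours thr i) st).1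
        (js.foldl (pvPairStepB contours thr i) comp) := by
  induction js with
  | nil => intro st comp hI hM; exact ⟨hI, hM⟩
  | cons j js ih =>
    intro st comp hI hM
    simp only [List.foldl_cons]
    obtain ⟨hI', hM'⟩ := pair_step_joint hI hM hi (hjs j (by simp))
    exact ih (fun j' hj' => hjs j' (by simp [hj'])) hI' hM'

-- the outer i loop
theorem pair_fold_outer {contours : List (List (List Int))} {thr : Int} {n : Nat}
    (is : List Nat) (his : ∀ i ∈ is, i < n) :
    ∀ {st : List Nat × List Nat} {comp : List Nat}, UFInv n st.1 st.2 → MinRep n st.1 comp →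
    UFInv n (is.foldl (fun st i => (List.range' (i+1) (n - (i+1))).foldl
          (pvPairStepA contours thr i) st) st).1
        (is.foldl (fun st i => (List.range' (i+1) (n - (i+1))).foldl
          (pvPairStepA contours thr i) st) st).2 ∧
      MinRep n (is.foldl (fun st i => (List.range' (i+1) (n - (i+1))).foldl
          (pvPairStepA contours thr i) st) st).1
        (is.foldl (fun comp i => (List.range' (i+1) (n - (i+1))).foldl
          (pvPairStepB contours thr i) comp) comp) := by
  induction is with
  | nil => intro st comp hI hM; exact ⟨hI, hM⟩
  | cons i is ih =>
    intro st comp hI hM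
    simp only [List.foldl_cons]
    have hjs : ∀ j ∈ List.range' (i+1) (n - (i+1)), j < n := by
      intro j hj
      have := List.mem_range'.mp hj
      omega
    obtain ⟨hI', hM'⟩ := pair_fold_inner _ hjs (his i (by simp)) hI hM
    exact ih (fun i' hi' => his i' (by simp [hi'])) hI' hM'

-- the representatives (class minima) among indices < m, and the rectangles of r's class among indices < m
def repsUpTo (comp : List Nat) (m : Nat) : List Nat :=
  (List.range m).filter (fun u => comp.getD u 0 == u)

def memUpTo (contours : List (List (List Int))) (comp : List Nat) (m r : Nat) :
    List (List (List Int)) :=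
  ((List.range m).filter (fun k => comp.getD k 0 == r)).map (fun k => contours.getD k [])

theorem mem_repsUpTo {comp : List Nat} {m r : Nat} :
    r ∈ repsUpTo comp m ↔ r < m ∧ comp.getD r 0 = r := by
  simp [repsUpTo, List.mem_filter, List.mem_range]

theorem nodup_repsUpTo (comp : List Nat) (m : Nat) : (repsUpTo comp m).Nodup :=
  (List.nodup_range).filter _

theorem nodup_reps_roots {n : Nat} {pf comp : List Nat} (hM : MinRep n pf comp) {m : Nat}
    (hm : m ≤ n) : ((repsUpTo comp m).map (fun r => pvRoot pf r)).Nodup := by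
  refine List.Nodup.map_on ?_ (nodup_repsUpTo comp m)
  intro r1 h1 r2 h2 hr
  obtain ⟨hr1, hc1⟩ := mem_repsUpTo.mp h1
  obtain ⟨hr2, hc2⟩ := mem_repsUpTo.mp h2
  have := mr_same hM (by omega : r1 < n) (by omega : r2 < n) hr
  omega

theorem repsUpTo_succ_self {comp : List Nat} {m : Nat} (hc : comp.getD m 0 = m) :
    repsUpTo comp (m+1) = repsUpTo comp m ++ [m] := by
  rw [repsUpTo, repsUpTo, List.range_succ, List.filter_append]
  simp only [List.filter_cons, List.filter_nil]
  rw [if_pos (by simp only [beq_iff_eq]; exact hc)]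

theorem repsUpTo_succ_ne {comp : List Nat} {m : Nat} (hc : ¬ comp.getD m 0 = m) :
    repsUpTo comp (m+1) = repsUpTo comp m := by
  rw [repsUpTo, repsUpTo, List.range_succ, List.filter_append]
  simp only [List.filter_cons, List.filter_nil]
  rw [if_neg (by simp only [beq_iff_eq]; exact hc), List.append_nil]

theorem memUpTo_succ_self {contours : List (List (List Int))} {comp : List Nat} {m r : Nat}
    (hc : comp.getD m 0 = r) :
    memUpTo contours comp (m+1) r = memUpTo contours comp m r ++ [contours.getD m []] := by
  rw [memUpTo, memUpTo, List.range_succ, List.filter_append, List.map_append]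
  simp only [List.filter_cons, List.filter_nil]
  rw [if_pos (by simp only [beq_iff_eq]; exact hc)]
  rfl

theorem memUpTo_succ_ne {contours : List (List (List Int))} {comp : List Nat} {m r : Nat}
    (hc : ¬ comp.getD m 0 = r) :
    memUpTo contours comp (m+1) r = memUpTo contours comp m r := by
  rw [memUpTo, memUpTo, List.range_succ, List.filter_append, List.map_append]
  simp only [List.filter_cons, List.filter_nil]
  rw [if_neg (by simp only [beq_iff_eq]; exact hc)]
  simp

theorem memUpTo_self_nil {n : Nat} {pf comp : List Nat} (hM : MinRep n pf comp)
    {contours : List (List (List Int))} {m : Nat} (hm : m ≤ n) (hc : comp.getD m 0 = m) :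
    memUpTo contours comp m m = [] := by
  rw [memUpTo, List.map_eq_nil_iff, List.filter_eq_nil_iff]
  intro k hk
  have hkm : k < m := List.mem_range.mp hk
  simp only [beq_iff_eq]
  intro hck
  have := mr_le_self hM (by omega : k < n)
  omega

-- one step of A's grouping loop, against the label characterisation
theorem group_step {n m : Nat} {pf rkf comp : List Nat} {contours : List (List (List Int))}
    {st : List Nat × PySem.Dict Nat (List (List (List Int)))}
    (hM : MinRep n pf comp) (hmn : m < n)
    (hI : UFInv n st.1 rkf) (hroots : ∀ z, pvRoot st.1 z = pvRoot pf z)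
    (hitems : st.2.items = (repsUpTo comp m).map
      (fun r => (pvRoot pf r, memUpTo contours comp m r))) :
    UFInv n (pvGroupStepA contours st m).1 rkf ∧
      (∀ z, pvRoot (pvGroupStepA contours st m).1 z = pvRoot pf z) ∧
      (pvGroupStepA contours st m).2.items = (repsUpTo comp (m+1)).map
        (fun r => (pvRoot pf r, memUpTo contours comp (m+1) r)) := by
  have hlen : st.1.length = (n-1)+1 := by rw [hI.1]; omega
  obtain ⟨hr, hI', hroots'⟩ := uf_find_spec (n-1) hI hmn (uf_fix_pred hI hmn)
  rw [pvGroupStepA, hlen]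
  set f := pvFind ((n-1)+1) st.1 m with hf
  have hρ : f.2 = pvRoot pf m := by rw [hr, hroots m]
  have hkeys : st.2.keys = (repsUpTo comp m).map (fun r => pvRoot pf r) := by
    show st.2.items.map Prod.fst = _
    rw [hitems, List.map_map]
    rfl
  have hnodup : st.2.keys.Nodup := by
    rw [hkeys]; exact nodup_reps_roots hM (by omega)
  have hcont : st.2.contains f.2 = true ↔ comp.getD m 0 < m := by
    rw [PySem.Dict.contains_iff_mem_keys, hkeys, List.mem_map]
    constructor
    · rintro ⟨r, hrmem, hrr⟩
      obtain ⟨hrm, hcr⟩ := mem_repsUpTo.mp hrmem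
      have : comp.getD r 0 = comp.getD m 0 :=
        mr_same hM (by omega) hmn (by rw [hρ] at hrr; exact hrr)
      omega
    · intro hlt
      refine ⟨comp.getD m 0, mem_repsUpTo.mpr ⟨hlt, mr_idem hM hmn⟩, ?_⟩
      rw [hρ]
      exact mr_root hM hmn
  refine ⟨hI', fun z => (hroots' z).trans (hroots z), ?_⟩
  by_cases hc : comp.getD m 0 = m
  · -- m is a new representative: fresh key appended
    have hncont : st.2.contains f.2 = false := by
      rcases Bool.eq_false_or_eq_true (st.2.contains f.2) with h | h
      · exfalso; have := hcont.mp h; omega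
      · exact h
    rw [if_neg (by simp [hncont])]
    show ((st.2.insert f.2 []).insert f.2
        ((st.2.insert f.2 []).getD f.2 [] ++ [contours.getD m []])).items = _
    rw [PySem.Dict.getD_insert_self, PySem.Dict.insert_insert_self,
      PySem.Dict.items_insert_of_not_contains _ _ hncont, hitems, List.nil_append,
      repsUpTo_succ_self hc, List.map_append]
    congr 1
    · refine List.map_congr_left (fun r hrmem => ?_)
      obtain ⟨hrm, hcr⟩ := mem_repsUpTo.mp hrmem
      rw [memUpTo_succ_ne (by omega)]
    · rw [hρ]
      simp only [List.map_cons, List.map_nil]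
      rw [memUpTo_succ_self hc, memUpTo_self_nil hM (by omega) hc, List.nil_append]
  · -- m joins the class of its (earlier) representative comp[m]
    have hr0lt : comp.getD m 0 < m := by
      have := mr_le_self hM hmn
      omega
    have hcont' : st.2.contains f.2 = true := hcont.mpr hr0lt
    rw [if_pos (by simp [hcont'])]
    have hmemit : (pvRoot pf m, memUpTo contours comp m (comp.getD m 0)) ∈ st.2.items := by
      rw [hitems, List.mem_map]
      exact ⟨comp.getD m 0, mem_repsUpTo.mpr ⟨hr0lt, mr_idem hM hmn⟩,
        by rw [mr_root hM hmn]⟩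
    have hgetD : st.2.getD f.2 [] = memUpTo contours comp m (comp.getD m 0) := by
      rw [hρ]
      exact PySem.Dict.getD_of_mem_items _ hmemit hnodup []
    rw [PySem.Dict.items_insert_of_contains _ _ hcont', hitems, List.map_map,
      repsUpTo_succ_ne hc]
    refine List.map_congr_left (fun r hrmem => ?_)
    obtain ⟨hrm, hcr⟩ := mem_repsUpTo.mp hrmem
    simp only [Function.comp_apply]
    by_cases hrρ : r = comp.getD m 0
    · have hroot_r : pvRoot pf r = f.2 := by
        rw [hρ, hrρ]; exact mr_root hM hmn
      rw [if_pos (by simp [hroot_r]), hgetD, hρ]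
      have : memUpTo contours comp (m+1) r =
          memUpTo contours comp m (comp.getD m 0) ++ [contours.getD m []] := by
        rw [hrρ] at hcr ⊢
        exact memUpTo_succ_self rfl
      rw [this]
      have hrr : pvRoot pf r = pvRoot pf m := by rw [hrρ]; exact mr_root hM hmn
      rw [hrr]
    · have hroot_r : ¬ (pvRoot pf r = f.2) := by
        rw [hρ]
        intro h
        have := mr_same hM (by omega : r < n) hmn h
        omega
      rw [if_neg (by simp [hroot_r]), memUpTo_succ_ne (by omega)]

-- A's grouping loop, fully characterised
theorem group_fold {n : Nat} {pf rkf comp : List Nat} {contours : List (List (List Int))}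
    (hI : UFInv n pf rkf) (hM : MinRep n pf comp) :
    ∀ m, m ≤ n →
      UFInv n ((List.range m).foldl (pvGroupStepA contours) (pf, PySem.Dict.empty)).1 rkf ∧
      (∀ z, pvRoot ((List.range m).foldl (pvGroupStepA contours) (pf, PySem.Dict.empty)).1 z =
        pvRoot pf z) ∧
      ((List.range m).foldl (pvGroupStepA contours) (pf, PySem.Dict.empty)).2.items =
        (repsUpTo comp m).map (fun r => (pvRoot pf r, memUpTo contours comp m r)) := by
  intro m
  induction m with
  | zero =>
    intro _
    exact ⟨hI, fun z => rfl, by simp [repsUpTo, PySem.Dict.empty]⟩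
  | succ m ih =>
    intro hm
    obtain ⟨hI', hroots', hitems'⟩ := ih (by omega)
    rw [List.range_succ, List.foldl_append, List.foldl_cons, List.foldl_nil]
    exact group_step hM (by omega) hI' hroots' hitems'

-- ===== VERDICT (by name: the statement is the Claim_ definition above) =====
theorem merge_areas_spec : Claim_equal_merge_areas := by
  intro contours thr hdom hpre
  show merge_areas contours thr = merge_areas_alt contours thr
  simp only [merge_areas, merge_areas_alt]
  set n := contours.length with hn
  set stf := (List.range n).foldl
    (fun st i => (List.range' (i+1) (n - (i+1))).foldl (pvPairStepA contours thr i) st)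
    (List.range n, List.replicate n 0) with hstf
  set compf := (List.range n).foldl
    (fun comp i => (List.range' (i+1) (n - (i+1))).foldl (pvPairStepB contours thr i) comp)
    (List.range n) with hcompf
  obtain ⟨hIf, hMf⟩ := pair_fold_outer (contours := contours) (thr := thr) (n := n)
    (List.range n) (fun i h => List.mem_range.mp h)
    (st := (List.range n, List.replicate n 0)) (comp := List.range n)
    (uf_init n) (mr_init n)
  rw [← hstf] at hIf
  rw [← hstf, ← hcompf] at hMf
  obtain ⟨hIg, hrg, hitems⟩ := group_fold hIf hMf n (le_refl n)
  set gr := (List.range n).foldl (pvGroupStepA contours) (stf.1, PySem.Dict.empty) with hgr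
  have hvalues : gr.2.values = (repsUpTo compf n).map (fun r => memUpTo contours compf n r) := by
    show gr.2.items.map Prod.snd = _
    rw [hitems, List.map_map]
    rfl
  rw [PySem.List.foldl_append_singleton_eq_map, hvalues, List.map_map,
    PySem.List.foldl_append_if]
  simp only [List.nil_append]
  rfl
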